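-- pv_equiv track=rewrite | github.com/danieleschmidt/dynamic-graph-fed-rl-lab | src/dynamic_graph_fed_rl/quantum_hardware/error_correction.py | decode_surface_code_syndrome
-- ===== SOURCE A (Python) =====
-- from typing import Any, Dict, List, Optional, Tuple, Union
--
-- def decode_surface_code_syndrome(syndrome: List[int]) -> List[Tuple[str, int]]:
--     """Decode surface code syndrome to determine error corrections."""
--     # Simplified minimum weight perfect matching decoder
--     corrections = []
--
--     # Find syndrome positions
--     syndrome_positions = [i for i, bit in enumerate(syndrome) if bit == 1]
--
--     # Pair up syndromes (simplified - real decoder would use MWPM)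
--     for i in range(0, len(syndrome_positions), 2):
--         if i + 1 < len(syndrome_positions):
--             pos1, pos2 = syndrome_positions[i], syndrome_positions[i + 1]
--             # Apply correction along path between syndromes
--             corrections.append(("x", (pos1 + pos2) // 2))
--
--     return corrections
-- ===== SOURCE B (Python) =====
-- from typing import List, Tuple
--
-- def decode_surface_code_syndrome(syndrome: List[int]) -> List[Tuple[str, int]]:
--     """Decode surface code syndrome to determine error corrections (single pass)."""
--     corrections = []
--     pending = None
--     for i, bit in enumerate(syndrome):
--         if bit == 1:
--             if pending is None:
--                 pending = i
--             else:
--                 corrections.append(("x", (pending + i) // 2))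
--                 pending = None
--     return corrections
-- ===== Notes on version B (the rewrite author's own statement) =====
-- stated objective: simpler
-- what changed: Single pass over enumerate(syndrome) with one 'pending' variable pairs active positions on the fly, instead of first materialising the list of syndrome positions and then indexing into it with a stride-2 range loop.
import Mathlib
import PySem

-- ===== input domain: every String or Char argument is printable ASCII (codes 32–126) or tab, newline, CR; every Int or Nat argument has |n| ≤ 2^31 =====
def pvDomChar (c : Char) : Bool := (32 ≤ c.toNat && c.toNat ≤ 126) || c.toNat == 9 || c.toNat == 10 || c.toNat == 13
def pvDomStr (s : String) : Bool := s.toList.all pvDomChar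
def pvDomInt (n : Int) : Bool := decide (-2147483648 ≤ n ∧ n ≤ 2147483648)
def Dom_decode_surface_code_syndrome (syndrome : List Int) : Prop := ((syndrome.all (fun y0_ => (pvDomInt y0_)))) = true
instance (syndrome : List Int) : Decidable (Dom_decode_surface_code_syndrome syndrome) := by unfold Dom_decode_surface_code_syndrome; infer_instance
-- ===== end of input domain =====

-- B replaces A's two phases (collect active positions, then index pairs with a stride-2 loop)
-- by one pass holding a single 'pending' position; objective: simpler.

-- ===== PORT A =====
def decode_surface_code_syndrome (syndrome : List Int) : List (String × Int) :=
  let syndrome_positions : List Int :=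
    ((PySem.List.enumerate syndrome 0).filter (fun p => p.2 == 1)).map (fun p => p.1)
  (PySem.List.pyRange 0 (PySem.List.len syndrome_positions) 2).foldl
    (fun corrections i =>
      if i + 1 < PySem.List.len syndrome_positions then
        corrections ++ [("x", PySem.Int.floordiv
          (PySem.List.pyGetD syndrome_positions i 0 + PySem.List.pyGetD syndrome_positions (i + 1) 0) 2)]
      else corrections) []

-- ===== PORT B =====
def decode_surface_code_syndrome_alt (syndrome : List Int) : List (String × Int) :=
  let st := (PySem.List.enumerate syndrome 0).foldl
    (fun (st : List (String × Int) × Option Int) (p : Int × Int) =>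
      if p.2 == 1 then
        match st.2 with
        | none => (st.1, some p.1)
        | some pending => (st.1 ++ [("x", PySem.Int.floordiv (pending + p.1) 2)], none)
      else st) ([], none)
  st.1

-- ===== PRECONDITION & SPEC =====
def Spec_decode_surface_code_syndrome (syndrome : List Int) (out : List (String × Int)) : Prop := out = decode_surface_code_syndrome_alt syndrome
instance (syndrome : List Int) (out : List (String × Int)) : Decidable (Spec_decode_surface_code_syndrome syndrome out) := by unfold Spec_decode_surface_code_syndrome; infer_instance

-- ===== CLAIM (what is proved, stated in full; the proofs are below) =====
def Claim_equal_decode_surface_code_syndrome : Prop := ∀ (syndrome : List Int), Dom_decode_surface_code_syndrome syndrome → Spec_decode_surface_code_syndrome syndrome (decode_surface_code_syndrome syndrome)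

-- ===== LEMMAS AND PROOFS =====

/-- Reference pairing of a list of positions: consecutive pairs, trailing odd one dropped. -/
def pairUp : List Int → List (String × Int)
  | [] => []
  | [_] => []
  | p :: q :: rest => ("x", PySem.Int.floordiv (p + q) 2) :: pairUp rest

/-- One pairing step of B's loop, on the position only. -/
def bG (st : List (String × Int) × Option Int) (x : Int) : List (String × Int) × Option Int :=
  match st.2 with
  | none => (st.1, some x)
  | some pending => (st.1 ++ [("x", PySem.Int.floordiv (pending + x) 2)], none)

/-- Splitting off the first index of A's stride-2 range. -/
lemma pyRange2_step (n : Nat) :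
    PySem.List.pyRange 0 ((n : Int) + 2) 2 = 0 :: (PySem.List.pyRange 0 (n : Int) 2).map (· + 2) := by
  rw [PySem.List.pyRange_of_pos _ _ (by norm_num), PySem.List.pyRange_of_pos _ _ (by norm_num)]
  have h1 : (0 : Int) < (n : Int) + 2 := by positivity
  rw [if_pos h1]
  have hc : ((((n : Int) + 2) - 0 + 2 - 1) / 2).toNat =
      (if (0 : Int) < (n : Int) then (((n : Int) - 0 + 2 - 1) / 2).toNat else 0) + 1 := by
    split_ifs with h <;> omega
  rw [hc, List.range_succ_eq_map, List.map_cons, List.map_map, List.map_map]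
  refine congrArg₂ List.cons (by norm_num) ?_
  apply List.map_congr_left
  intro k _
  simp only [Function.comp]
  push_cast
  ring

/-- A's stride-2 indexing fold computes `pairUp`, for any accumulator. -/
lemma lemA : ∀ (ps : List Int) (c : List (String × Int)),
    (PySem.List.pyRange 0 (PySem.List.len ps) 2).foldl
      (fun corrections i =>
        if i + 1 < PySem.List.len ps then
          corrections ++ [("x", PySem.Int.floordiv
            (PySem.List.pyGetD ps i 0 + PySem.List.pyGetD ps (i + 1) 0) 2)]
        else corrections) c = c ++ pairUp ps := by
  intro ps
  induction ps using pairUp.induct with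
  | case1 =>
      intro c
      have h0 : PySem.List.len ([] : List Int) = 0 := by simp
      rw [h0]
      have h1 : PySem.List.pyRange 0 0 2 = [] := by decide
      rw [h1]
      simp [pairUp]
  | case2 p =>
      intro c
      have h0 : PySem.List.len [p] = 1 := by simp
      rw [h0]
      have h1 : PySem.List.pyRange 0 1 2 = [0] := by decide
      rw [h1]
      simp [pairUp]
  | case3 p q rest ih =>
      intro c
      have hl : PySem.List.len rest = (rest.length : Int) := by simp
      rw [hl] at ih
      have hlen : PySem.List.len (p :: q :: rest) = (rest.length : Int) + 2 := by
        simp; ring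
      rw [hlen, pyRange2_step rest.length]
      rw [List.foldl_cons, List.foldl_map]
      have h01 : ((0 : Int) + 1 < (rest.length : Int) + 2) := by omega
      rw [if_pos h01]
      have hg0 : PySem.List.pyGetD (p :: q :: rest) 0 0 = p := by
        rw [PySem.List.pyGetD_ofNat']
        rfl
      have hg1 : PySem.List.pyGetD (p :: q :: rest) (0 + 1) 0 = q := by
        rw [show ((0 : Int) + 1) = 1 by norm_num, PySem.List.pyGetD_ofNat']
        rfl
      rw [hg0, hg1]
      have hpair : c ++ pairUp (p :: q :: rest)
          = (c ++ [("x", PySem.Int.floordiv (p + q) 2)]) ++ pairUp rest := by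
        simp [pairUp]
      rw [hpair, ← ih (c ++ [("x", PySem.Int.floordiv (p + q) 2)])]
      apply PySem.List.foldl_congr_mem
      intro acc j hj
      obtain ⟨hj0, hjn, -⟩ := (PySem.List.mem_pyRange_iff_of_pos (by norm_num) j).mp hj
      obtain ⟨k, rfl⟩ : ∃ k : Nat, j = (k : Int) := ⟨j.toNat, by omega⟩
      have e2 : ((k : Int) + 2 + 1) = ((k + 3 : Nat) : Int) := by push_cast; ring
      have e1 : ((k : Int) + 2) = ((k + 2 : Nat) : Int) := by push_cast; ring
      have e3 : ((k : Int) + 1) = ((k + 1 : Nat) : Int) := by push_cast; ring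
      rw [e2, e1, e3]
      simp only [PySem.List.pyGetD_natCast]
      have hgd2 : List.getD (p :: q :: rest) (k + 2) 0 = List.getD rest k 0 := rfl
      have hgd3 : List.getD (p :: q :: rest) (k + 3) 0 = List.getD rest (k + 1) 0 := rfl
      rw [hgd2, hgd3]
      by_cases hk : (((k + 1 : Nat) : Int) < (rest.length : Int))
      · rw [if_pos (by push_cast at hk ⊢; omega), if_pos hk]
      · rw [if_neg (by push_cast at hk ⊢; omega), if_neg hk]

/-- B's fold skips entries whose bit is not 1: it is a fold over the filtered list. -/
lemma foldl_filter_skip {α β : Type} (P : α → Bool) (g : β → α → β) :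
    ∀ (l : List α) (st : β),
      l.foldl (fun st p => if P p then g st p else st) st = (l.filter P).foldl g st := by
  intro l
  induction l with
  | nil => intro st; simp
  | cons x xs ih =>
      intro st
      by_cases h : P x = true <;> simp [h, ih]

/-- B's pairing fold over the positions computes `pairUp`, for any accumulator. -/
lemma lemB : ∀ (xs : List Int) (c : List (String × Int)),
    (xs.foldl bG (c, none)).1 = c ++ pairUp xs := by
  intro xs
  induction xs using pairUp.induct with
  | case1 => intro c; simp [pairUp]
  | case2 p => intro c; simp [pairUp, bG]
  | case3 p q rest ih => intro c; simpa [pairUp, bG] using ih (c ++ [("x", PySem.Int.floordiv (p + q) 2)])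

-- ===== VERDICT (by name: the statement is the Claim_ definition above) =====
theorem decode_surface_code_syndrome_spec : Claim_equal_decode_surface_code_syndrome := by
  intro syndrome _
  unfold Spec_decode_surface_code_syndrome decode_surface_code_syndrome decode_surface_code_syndrome_alt
  dsimp only []
  rw [lemA]
  show _ = ((PySem.List.enumerate syndrome 0).foldl
      (fun (st : List (String × Int) × Option Int) (p : Int × Int) =>
        if p.2 == 1 then bG st p.1 else st) ([], none)).1
  rw [foldl_filter_skip (fun p : Int × Int => p.2 == 1) (fun st p => bG st p.1)]
  rw [show ((PySem.List.enumerate syndrome 0).filter (fun p : Int × Int => p.2 == 1)).foldl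
        (fun st p => bG st p.1) (([], none) : List (String × Int) × Option Int)
      = (((PySem.List.enumerate syndrome 0).filter (fun p : Int × Int => p.2 == 1)).map
          (fun p => p.1)).foldl bG (([], none) : List (String × Int) × Option Int)
      from by rw [List.foldl_map]]
  rw [lemB]
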